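-- pv_equiv track=rewrite | github.com/jszopi/repESP | repESP/util.py | list_from_dict
-- ===== SOURCE A (Python) =====
-- from typing import Dict, List, TypeVar, Union
--
-- T1 = TypeVar('T1')
--
-- T2 = TypeVar('T2')
--
-- def list_from_dict(
--     dict_: Dict[int, T1],
--     length: int,
--     default: T2=None,
--     one_indexed: bool=False
-- ) -> List[Union[T1, T2]]:
--     """Convenience function for creating lists from dictionaries
--
--     For sparse data or certain user input it may be easier to represent
--     properties of a list (e.g. equivalence information for each atom in a
--     molecule) as a dictionary. However, many interfaces of this library expect
--     lists and thus this convenience function is provided for the conversion.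
--
--     Example
--     -------
--     >>> list_from_dict({1: "foo"}, 3, "bar")
--     ["bar", "foo", "bar"]
--
--     Parameters
--     ----------
--     dict\_ : typing.Dict[int, T1]
--         The dictionary mapping the index of the desired list to its property,
--         which is of the generic type `T1`. If this argument contains keys
--         outside the range of valid indices in the desired list, the input
--         is not valid; no errors will be raised but these keys will be ignored.
--
--         Valid indices are integer values of `i` that fulfil ``0 <= i <
--         length`` if `one_indexed` is False and ``0 < i <= length`` otherwise.
--     length : int
--         The length of the desired list.
--     default : T2, optional
--         The value to be used in the output list when the index is not included
--         in the `dict_` argument. The type of this value is not required to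
--         be of the same type `T1` as the values of `dict_`. Defaults to None.
--     one_indexed : bool, optional
--         Whether the list indices in the keys of the input ``dict_`` are counting
--         from one. Defaults to False, meaning they are counting from zero.
--
--     Returns
--     -------
--     typing.List[Union[T1, T2]]
--         A list of items of the given `length` with values specified in `dict_`.
--     """
--     offset = 1 if one_indexed else 0
--     return [
--         # mypy infers the result to be a Union including None, whereas I see it
--         # as falling under T2.
--         dict_[i+offset] if i+offset in dict_ else default  # type: ignore
--         for i in range(length)
--     ]
-- ===== SOURCE B (Python) =====
-- def list_from_dict(dict_, length, default=None, one_indexed=False):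
--     # Scatter: fill with default once, then place each dict entry at its index,
--     # silently skipping keys outside range (as documented).
--     result = [default] * length
--     offset = 1 if one_indexed else 0
--     for key, value in dict_.items():
--         idx = key - offset
--         if 0 <= idx < length:
--             result[idx] = value
--     return result
-- ===== Notes on version B (the rewrite author's own statement) =====
-- stated objective: alternative
-- what changed: B fills a default list once and scatters the dict's items into it (skipping out-of-range keys), instead of scanning every index of range(length) and probing the dict for each; same cost in practice.
import Mathlib
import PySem

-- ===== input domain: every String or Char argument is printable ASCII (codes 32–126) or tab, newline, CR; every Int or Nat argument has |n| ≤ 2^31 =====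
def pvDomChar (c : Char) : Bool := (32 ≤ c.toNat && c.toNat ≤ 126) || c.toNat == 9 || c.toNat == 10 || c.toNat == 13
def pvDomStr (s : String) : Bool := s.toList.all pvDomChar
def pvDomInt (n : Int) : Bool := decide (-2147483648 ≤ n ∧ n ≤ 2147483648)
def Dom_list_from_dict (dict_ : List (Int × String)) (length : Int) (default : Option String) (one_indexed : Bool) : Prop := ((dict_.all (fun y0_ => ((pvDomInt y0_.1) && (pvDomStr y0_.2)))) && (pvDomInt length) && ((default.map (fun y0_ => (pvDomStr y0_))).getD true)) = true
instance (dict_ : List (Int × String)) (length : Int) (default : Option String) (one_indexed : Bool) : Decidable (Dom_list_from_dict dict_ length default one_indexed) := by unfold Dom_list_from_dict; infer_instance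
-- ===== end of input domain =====

-- B scatters the dict's items into a default-filled list instead of probing the dict at every index of range(length).

-- ===== PORT A =====
-- [dict_[i+offset] if i+offset in dict_ else default for i in range(length)]
def list_from_dict (dict_ : List (Int × String)) (length : Int) (default : Option String) (one_indexed : Bool) : List (Option String) :=
  let offset : Int := if one_indexed then 1 else 0
  (PySem.List.pyRange 0 length 1).map (fun i =>
    match (PySem.Dict.mk dict_).get? (i + offset) with
    | some v => some v
    | none => default)

-- ===== PORT B =====
def list_from_dict_alt (dict_ : List (Int × String)) (length : Int) (default : Option String) (one_indexed : Bool) : List (Option String) :=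
  let offset : Int := if one_indexed then 1 else 0
  dict_.foldl (fun res kv =>
    let idx := kv.1 - offset
    if 0 ≤ idx ∧ idx < length then res.set idx.toNat (some kv.2) else res)
    (PySem.List.pyRepeat [default] length)

-- ===== PRECONDITION & SPEC =====
-- Pre_ excludes association lists with duplicate keys: they cannot arise from a Python dict
-- (dict keys are unique), and on them the first-vs-last occurrence choice is an artefact of
-- the assoc-list representation, not of either Python program.
def Pre_list_from_dict (dict_ : List (Int × String)) (length : Int) (default : Option String) (one_indexed : Bool) : Prop :=
  (dict_.map Prod.fst).Nodup
instance (dict_ : List (Int × String)) (length : Int) (default : Option String) (one_indexed : Bool) : Decidable (Pre_list_from_dict dict_ length default one_indexed) := by unfold Pre_list_from_dict; infer_instance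

def pvWitness_list_from_dict : (List (Int × String)) × Int × Option String × Bool := ([(1, "foo")], 3, some "bar", false)

def Spec_list_from_dict (dict_ : List (Int × String)) (length : Int) (default : Option String) (one_indexed : Bool) (out : List (Option String)) : Prop := out = list_from_dict_alt dict_ length default one_indexed
instance (dict_ : List (Int × String)) (length : Int) (default : Option String) (one_indexed : Bool) (out : List (Option String)) : Decidable (Spec_list_from_dict dict_ length default one_indexed out) := by unfold Spec_list_from_dict; infer_instance

-- ===== CLAIM (what is proved, stated in full; the proofs are below) =====
def Claim_equal_list_from_dict : Prop := ∀ (dict_ : List (Int × String)) (length : Int) (default : Option String) (one_indexed : Bool), Dom_list_from_dict dict_ length default one_indexed → Pre_list_from_dict dict_ length default one_indexed → Spec_list_from_dict dict_ length default one_indexed (list_from_dict dict_ length default one_indexed)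

-- ===== LEMMAS AND PROOFS =====

-- The scatter fold preserves the list's length.
theorem scatter_length (dict_ : List (Int × String)) (length offset : Int)
    (res : List (Option String)) :
    (dict_.foldl (fun res kv =>
      let idx := kv.1 - offset
      if 0 ≤ idx ∧ idx < length then res.set idx.toNat (some kv.2) else res) res).length
      = res.length := by
  induction dict_ generalizing res with
  | nil => rfl
  | cons kv t ih =>
    simp only [List.foldl_cons]
    rw [ih]
    split <;> simp

-- Element j of the scatter fold: the unique entry with key j + offset if present, else the
-- initial value at j (requires nodup keys and j a valid index, i.e. j < length.toNat = res.length).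
theorem scatter_getElem? (dict_ : List (Int × String)) (length offset : Int)
    (res : List (Option String)) (j : Nat)
    (hnd : (dict_.map Prod.fst).Nodup) (hlen : res.length = length.toNat) (hj : j < length.toNat) :
    (dict_.foldl (fun res kv =>
      let idx := kv.1 - offset
      if 0 ≤ idx ∧ idx < length then res.set idx.toNat (some kv.2) else res) res)[j]?
      = match dict_.find? (fun kv => kv.1 == (j : Int) + offset) with
        | some kv => some (some kv.2)
        | none => res[j]? := by
  induction dict_ generalizing res with
  | nil => rfl
  | cons kv t ih =>
    obtain ⟨k, v⟩ := kv
    simp only [List.map_cons, List.nodup_cons] at hnd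
    obtain ⟨hk, hndt⟩ := hnd
    simp only [List.foldl_cons]
    by_cases hkey : k = (j : Int) + offset
    · -- the head is the (unique) entry for index j
      have hcond : (0 : Int) ≤ k - offset ∧ k - offset < length := by omega
      have hfind : t.find? (fun kv => kv.1 == (j : Int) + offset) = none := by
        rw [List.find?_eq_none]
        intro x hx hbeq
        exact hk (by
          have : x.1 = (j : Int) + offset := by simpa using hbeq
          rw [hkey, ← this]
          exact List.mem_map_of_mem hx)
      have hjn : (k - offset).toNat = j := by omega
      rw [List.find?_cons_of_pos (by simp [hkey]), if_pos hcond, hjn,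
          ih _ hndt (by simp [hlen]), hfind, List.getElem?_set_self (by omega)]
    · -- the head does not touch index j
      rw [List.find?_cons_of_neg (by simp [hkey])]
      by_cases hcond : (0 : Int) ≤ k - offset ∧ k - offset < length
      · rw [if_pos hcond, ih _ hndt (by simp [hlen])]
        have hne : (k - offset).toNat ≠ j := by omega
        rw [List.getElem?_set_ne hne]
      · rw [if_neg hcond, ih _ hndt hlen]

-- (Dict.mk l).get? is first-match lookup in l.
theorem dict_mk_get? (l : List (Int × String)) (x : Int) :
    (PySem.Dict.mk l).get? x = (l.find? (fun kv => kv.1 == x)).map Prod.snd := rfl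

-- ===== VERDICT (by name: the statement is the Claim_ definition above) =====
theorem list_from_dict_spec : Claim_equal_list_from_dict := by
  intro dict_ length default one_indexed _hdom hpre
  unfold Spec_list_from_dict list_from_dict list_from_dict_alt
  set offset : Int := if one_indexed then 1 else 0 with hoff
  rw [PySem.List.pyRepeat_singleton]
  apply List.ext_getElem?
  intro j
  by_cases hj : j < length.toNat
  · rw [scatter_getElem? dict_ length offset _ j hpre (by simp) hj]
    have hA : ((PySem.List.pyRange 0 length 1).map (fun i =>
        match (PySem.Dict.mk dict_).get? (i + offset) with
        | some v => some v
        | none => default))[j]? = some (match (PySem.Dict.mk dict_).get? ((j : Int) + offset) with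
        | some v => some v
        | none => default) := by
      have h0 : (0 : Int) ≤ length := by omega
      have : length = ((length.toNat : Nat) : Int) := by omega
      rw [this]
      exact PySem.List.getElem?_map_pyRange_zero _ _ _ hj
    rw [hA, dict_mk_get?]
    cases hfind : dict_.find? (fun kv => kv.1 == (j : Int) + offset) with
    | none => simp [hj]
    | some kv => simp
  · have h1 : ((PySem.List.pyRange 0 length 1).map (fun i =>
        match (PySem.Dict.mk dict_).get? (i + offset) with
        | some v => some v
        | none => default)).length = length.toNat := by
      simp [PySem.List.pyRange_one]
    rw [List.getElem?_eq_none (by rw [h1]; omega),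
        List.getElem?_eq_none (by
          rw [scatter_length dict_ length offset (List.replicate length.toNat default)]
          simpa using (by omega : length.toNat ≤ j))]
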